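-- pv_equiv track=rewrite | github.com/cainemerrick98/datachain | src/datachain/query/planner.py | find_join_path_to_common_table
-- ===== SOURCE A (Python) =====
-- def find_join_path_to_common_table(
--     table: str,
--     graph: dict[str, list[str]],
--     common_table: str,
--     visited=None
-- ) -> list[tuple[str, str]] | None:
--     """
--     DFS to find the path from table to common_table.
--     Returns list of join tuples [(A,B), (B,C), ...] or None if no path.
--     """
--
--     if visited is None:
--         visited = set()
--
--     if table == common_table:
--         return []
--
--     visited.add(table)
--
--     for neighbor in graph.get(table, []):
--         if neighbor in visited:
--             continue
--
--         path = find_join_path_to_common_table(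
--             neighbor, graph, common_table, visited
--         )
--
--         if path is not None:
--             return [(table, neighbor)] + path
--
--     return None
-- ===== SOURCE B (Python) =====
-- def find_join_path_to_common_table(
--     table: str,
--     graph: dict[str, list[str]],
--     common_table: str,
--     visited=None
-- ) -> list[tuple[str, str]] | None:
--     """
--     Iterative DFS: an explicit stack of (node, neighbor-iterator) frames
--     replaces the recursion; the current edge chain is kept alongside and
--     popped on backtrack.  Same visited-set mutation as the recursive version.
--     """
--     if visited is None:
--         visited = set()
--
--     if table == common_table:
--         return []
--
--     visited.add(table)
--     stack = [(table, iter(graph.get(table, [])))]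
--     path = []
--
--     while stack:
--         node, it = stack[-1]
--         for neighbor in it:
--             if neighbor in visited:
--                 continue
--             if neighbor == common_table:
--                 return path + [(node, neighbor)]
--             visited.add(neighbor)
--             path.append((node, neighbor))
--             stack.append((neighbor, iter(graph.get(neighbor, []))))
--             break
--         else:
--             stack.pop()
--             if path:
--                 path.pop()
--
--     return None
-- ===== Notes on version B (the rewrite author's own statement) =====
-- stated objective: alternative
-- what changed: The recursive DFS is replaced by an iterative DFS with an explicit stack of (node, remaining-neighbors) frames and an edge-chain accumulator that is appended on descent and popped on backtrack, instead of recursion with path prepending after the recursive return.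
import Mathlib
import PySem

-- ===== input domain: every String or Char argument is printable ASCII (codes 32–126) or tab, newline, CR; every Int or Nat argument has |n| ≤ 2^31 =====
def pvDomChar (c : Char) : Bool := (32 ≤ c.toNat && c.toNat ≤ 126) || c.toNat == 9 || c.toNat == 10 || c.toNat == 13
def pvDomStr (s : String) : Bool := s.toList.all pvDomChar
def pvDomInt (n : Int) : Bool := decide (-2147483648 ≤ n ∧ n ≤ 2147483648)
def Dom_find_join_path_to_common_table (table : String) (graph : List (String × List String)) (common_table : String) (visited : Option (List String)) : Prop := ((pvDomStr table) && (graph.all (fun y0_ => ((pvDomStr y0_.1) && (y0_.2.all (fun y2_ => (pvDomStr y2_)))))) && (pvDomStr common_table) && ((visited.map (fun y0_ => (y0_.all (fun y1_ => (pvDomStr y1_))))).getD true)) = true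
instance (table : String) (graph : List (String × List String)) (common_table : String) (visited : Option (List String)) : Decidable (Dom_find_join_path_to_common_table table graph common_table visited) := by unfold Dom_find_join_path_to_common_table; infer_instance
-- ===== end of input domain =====

-- Iterative explicit-stack DFS (B) vs recursive DFS (A); equivalence is about the
-- return value (both Pythons also mutate a caller-supplied visited set identically).


-- ===== PORT A =====

-- graph.get(t, []): first-match lookup in the association list (exact: a Python
-- dict has unique keys, so first match = the dict's value).
def pvAdj (graph : List (String × List String)) (t : String) : List String :=
  match graph with
  | [] => []
  | (k, vs) :: rest => if k = t then vs else pvAdj rest t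

-- Fuel making both ports total.  Along any chain of nested recursive calls of A,
-- every call except possibly the last adds a fresh node to visited, and all such
-- nodes are drawn from the adjacency lists (plus the initial table), so the
-- nesting depth never exceeds (total neighbor count) + 2: this fuel never runs out.
def pvFuel (graph : List (String × List String)) : Nat :=
  graph.foldr (fun p acc => p.2.length + acc) 0 + 2

mutual
  -- the body of A's function (after the `visited is None` default is resolved)
  def pvRecA (graph : List (String × List String)) (common : String)
      (f : Nat) (t : String) (v : PySem.Set String) :
      Option (List (String × String)) × PySem.Set String :=
    match f with
    | 0 => (none, v)      -- fuel artifact, never reached from pvFuel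
    | f' + 1 =>
      if t = common then (some [], v)
      else pvGoA graph common f' t (pvAdj graph t) (PySem.Set.add v t)
  termination_by (f, 0)
  decreasing_by exact Prod.Lex.left _ _ (Nat.lt_succ_self f')

  -- A's `for neighbor in graph.get(table, [])` loop, threading the mutated visited set
  def pvGoA (graph : List (String × List String)) (common : String)
      (f : Nat) (t : String) (ns : List String) (v : PySem.Set String) :
      Option (List (String × String)) × PySem.Set String :=
    match ns with
    | [] => (none, v)
    | n :: rest =>
      if PySem.Set.contains v n then pvGoA graph common f t rest v
      else
        match pvRecA graph common f n v with
        | (some p, v') => (some ((t, n) :: p), v')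
        | (none, v') => pvGoA graph common f t rest v'
  termination_by (f, ns.length + 1)
  decreasing_by
    · exact Prod.Lex.right _ (by simp only [List.length_cons]; omega)
    · exact Prod.Lex.right _ (by simp only [List.length_cons]; omega)
    · exact Prod.Lex.right _ (by simp only [List.length_cons]; omega)
end

def find_join_path_to_common_table (table : String) (graph : List (String × List String)) (common_table : String) (visited : Option (List String)) : Option (List (String × String)) :=
  let v : PySem.Set String :=
    match visited with
    | none => PySem.Set.empty
    | some vs => PySem.Set.ofList vs
  (pvRecA graph common_table (pvFuel graph) table v).1

-- ===== PORT B =====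

-- potential function used only to justify termination of B's while-loop
def pvPhi (W : Nat) (f : Nat) (stack : List (String × List String)) : Nat :=
  match stack with
  | [] => 0
  | (_, r) :: rest => r.length * W ^ f + pvPhi W (f + 1) rest

def pvW (graph : List (String × List String)) : Nat :=
  graph.foldr (fun p acc => max p.2.length acc) 0 + 2

theorem pvAdj_len (graph : List (String × List String)) (t : String) :
    (pvAdj graph t).length + 2 ≤ pvW graph := by
  induction graph with
  | nil => simp [pvAdj, pvW]
  | cons p rest ih =>
    simp only [pvAdj, pvW, List.foldr] at *
    split_ifs with h
    · omega
    · omega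

theorem pvW_ge_two (graph : List (String × List String)) : 2 ≤ pvW graph := by
  unfold pvW; omega

theorem pvStep_skip (W : Nat) (hW : 2 ≤ W) (f : Nat) (node n : String)
    (ns : List String) (rest : List (String × List String)) :
    pvPhi W f ((node, ns) :: rest) + ((node, ns) :: rest).length <
      pvPhi W f ((node, n :: ns) :: rest) + ((node, n :: ns) :: rest).length := by
  have h1 : 0 < W ^ f := Nat.pow_pos (by omega)
  simp only [pvPhi, List.length_cons, Nat.succ_mul]
  omega

theorem pvStep_push (W : Nat) (hW : 2 ≤ W) (f' : Nat) (adj : List String)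
    (hadj : adj.length + 2 ≤ W) (n node : String) (ns : List String)
    (rest : List (String × List String)) :
    pvPhi W f' ((n, adj) :: (node, ns) :: rest) + ((n, adj) :: (node, ns) :: rest).length <
      pvPhi W (f' + 1) ((node, n :: ns) :: rest) + ((node, n :: ns) :: rest).length := by
  have h1 : 0 < W ^ f' := Nat.pow_pos (by omega)
  simp only [pvPhi, List.length_cons, Nat.succ_mul, pow_succ]
  have h3 : adj.length * W ^ f' + 2 ≤ W ^ f' * W := by
    calc adj.length * W ^ f' + 2 ≤ adj.length * W ^ f' + 2 * W ^ f' := by omega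
    _ = (adj.length + 2) * W ^ f' := by ring
    _ ≤ W * W ^ f' := Nat.mul_le_mul_right _ hadj
    _ = W ^ f' * W := Nat.mul_comm _ _
  omega

-- B's `while stack:` loop; the fuel plays the role of A's per-call fuel
-- (a frame at depth d runs with fuel pvFuel - 1 - d, restored on pop).
def pvLoopB (graph : List (String × List String)) (common : String)
    (f : Nat) (stack : List (String × List String))
    (path : List (String × String)) (v : PySem.Set String) :
    Option (List (String × String)) :=
  match stack with
  | [] => none
  | (_, []) :: rest =>                     -- iterator exhausted: pop / backtrack
    pvLoopB graph common (f + 1) rest path.dropLast v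
  | (node, n :: ns) :: rest =>
    if PySem.Set.contains v n then         -- `if neighbor in visited: continue`
      pvLoopB graph common f ((node, ns) :: rest) path v
    else
      match f with
      | 0 => pvLoopB graph common 0 ((node, ns) :: rest) path v  -- fuel artifact, never reached
      | f' + 1 =>
        if n = common then some (path ++ [(node, n)])
        else pvLoopB graph common f' ((n, pvAdj graph n) :: (node, ns) :: rest)
              (path ++ [(node, n)]) (PySem.Set.add v n)
termination_by pvPhi (pvW graph) f stack + stack.length
decreasing_by
  · simp [pvPhi]
  · exact pvStep_skip (pvW graph) (pvW_ge_two graph) f node n ns rest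
  · exact pvStep_skip (pvW graph) (pvW_ge_two graph) 0 node n ns rest
  · exact pvStep_push (pvW graph) (pvW_ge_two graph) f' (pvAdj graph n)
      (pvAdj_len graph n) n node ns rest

def find_join_path_to_common_table_alt (table : String) (graph : List (String × List String)) (common_table : String) (visited : Option (List String)) : Option (List (String × String)) :=
  let v : PySem.Set String :=
    match visited with
    | none => PySem.Set.empty
    | some vs => PySem.Set.ofList vs
  if table = common_table then some []
  else
    pvLoopB graph common_table (pvFuel graph - 1)
      [(table, pvAdj graph table)] [] (PySem.Set.add v table)

-- ===== PRECONDITION & SPEC =====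
def Spec_find_join_path_to_common_table (table : String) (graph : List (String × List String)) (common_table : String) (visited : Option (List String)) (out : Option (List (String × String))) : Prop := out = find_join_path_to_common_table_alt table graph common_table visited
instance (table : String) (graph : List (String × List String)) (common_table : String) (visited : Option (List String)) (out : Option (List (String × String))) : Decidable (Spec_find_join_path_to_common_table table graph common_table visited out) := by unfold Spec_find_join_path_to_common_table; infer_instance

-- ===== CLAIM (what is proved, stated in full; the proofs are below) =====
def Claim_equal_find_join_path_to_common_table : Prop := ∀ (table : String) (graph : List (String × List String)) (common_table : String) (visited : Option (List String)), Dom_find_join_path_to_common_table table graph common_table visited → Spec_find_join_path_to_common_table table graph common_table visited (find_join_path_to_common_table table graph common_table visited)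

-- ===== LEMMAS AND PROOFS =====

-- The stack machine run from a frame (t, ns) simulates A's neighbor loop:
-- on success it returns the accumulated path extended by A's path, on failure
-- it backtracks to the remaining stack with A's final visited set.
theorem pvBridge (graph : List (String × List String)) (common : String) :
    ∀ (f : Nat) (t : String) (ns : List String) (v : PySem.Set String)
      (path : List (String × String)) (rest : List (String × List String)),
      pvLoopB graph common f ((t, ns) :: rest) path v =
        (match pvGoA graph common f t ns v with
         | (some p, _) => some (path ++ p)
         | (none, v') => pvLoopB graph common (f + 1) rest path.dropLast v') := by
  intro f
  induction f using Nat.strong_induction_on with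
  | _ f ihf =>
    intro t ns
    induction ns with
    | nil =>
      intro v path rest
      rw [pvLoopB.eq_def, pvGoA.eq_def]
    | cons n rest' ihns =>
      intro v path rest
      rw [pvLoopB.eq_def]
      by_cases hmem : PySem.Set.contains v n
      · rw [pvGoA]
        simp only [hmem, if_true]
        exact ihns v path rest
      · simp only [hmem, if_false, Bool.false_eq_true]
        rw [pvGoA]
        simp only [hmem, if_false, Bool.false_eq_true]
        match f with
        | 0 =>
          rw [pvRecA]
          exact ihns v path rest
        | f' + 1 =>
          rw [pvRecA]
          by_cases hc : n = common
          · simp [hc]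
          · simp only [hc, if_false]
            rw [ihf f' (Nat.lt_succ_self f') n (pvAdj graph n) (PySem.Set.add v n)
                  (path ++ [(t, n)]) ((t, rest') :: rest)]
            cases hgo : pvGoA graph common f' n (pvAdj graph n) (PySem.Set.add v n) with
            | mk o v' =>
              cases o with
              | some p => simp
              | none =>
                simp only [List.dropLast_concat]
                exact ihns v' path rest

-- ===== VERDICT (by name: the statement is the Claim_ definition above) =====
theorem find_join_path_to_common_table_spec : Claim_equal_find_join_path_to_common_table := by
  intro table graph common_table visited hdom
  clear hdom
  unfold Spec_find_join_path_to_common_table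
  unfold find_join_path_to_common_table find_join_path_to_common_table_alt
  have hF : pvFuel graph = (graph.foldr (fun p acc => p.2.length + acc) 0 + 1) + 1 := by
    unfold pvFuel; omega
  rw [hF]
  simp only [Nat.add_sub_cancel]
  rw [pvRecA]
  by_cases hc : table = common_table
  · simp [hc]
  · simp only [hc, if_false]
    rw [pvBridge]
    rcases hgo : pvGoA graph common_table (graph.foldr (fun p acc => p.2.length + acc) 0 + 1)
        table (pvAdj graph table)
        (PySem.Set.add (match visited with
          | none => PySem.Set.empty
          | some vs => PySem.Set.ofList vs) table) with ⟨o, v2⟩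
    cases o <;> simp [pvLoopB]
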